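-- pv_equiv track=rewrite | github.com/programmingwithranawaqas/clarodele-test-backend | parse_oral_tarea2.py | _find_labeled_value
-- ===== SOURCE A (Python) =====
-- from typing import Dict, List, Optional, Tuple
--
-- def _find_labeled_value(lines: List[str], label: str) -> Tuple[Optional[str], Optional[int]]:
--     """
--     Find the first occurrence of a label (case-insensitive) and return the next non-empty line as its value.
--     Returns (value, value_index).
--     """
--     target = label.lower()
--     for idx, line in enumerate(lines):
--         if line.lower() == target:
--             # Pick the next non-empty line
--             for j in range(idx + 1, len(lines)):
--                 if lines[j].strip():
--                     return lines[j].strip(), j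
--     return None, None
-- ===== SOURCE B (Python) =====
-- from typing import List, Optional, Tuple
--
-- def _find_labeled_value(lines: List[str], label: str) -> Tuple[Optional[str], Optional[int]]:
--     """Single pass with a 'seen the label' flag instead of nested loops."""
--     target = label.lower()
--     found = False
--     for idx, line in enumerate(lines):
--         if found:
--             value = line.strip()
--             if value:
--                 return value, idx
--         elif line.lower() == target:
--             found = True
--     return None, None
-- ===== Notes on version B (the rewrite author's own statement) =====
-- stated objective: alternative
-- what changed: Replaces A's nested loops (outer label scan plus inner index-range rescan of the tail) with a single linear pass maintaining a 'seen the label' boolean flag.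
import Mathlib
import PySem

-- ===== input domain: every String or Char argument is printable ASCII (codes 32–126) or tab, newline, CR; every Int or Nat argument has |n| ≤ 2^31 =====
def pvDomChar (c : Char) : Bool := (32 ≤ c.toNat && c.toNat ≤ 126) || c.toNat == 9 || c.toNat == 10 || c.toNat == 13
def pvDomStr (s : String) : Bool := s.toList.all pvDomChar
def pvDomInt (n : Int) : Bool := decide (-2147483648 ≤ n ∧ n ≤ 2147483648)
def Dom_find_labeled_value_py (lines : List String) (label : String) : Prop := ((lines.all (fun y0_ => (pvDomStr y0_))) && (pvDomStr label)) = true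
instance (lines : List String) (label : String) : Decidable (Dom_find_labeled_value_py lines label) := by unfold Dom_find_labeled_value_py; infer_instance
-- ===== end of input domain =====

-- B replaces A's nested loops with one linear pass keeping a 'seen the label' flag; same return value everywhere.

-- ===== PORT A =====
-- inner loop: 'for j in range(idx+1, len(lines)): if lines[j].strip(): return …'
def pvInnerA (lines : List String) : List Int → Option (String × Int)
  | [] => none
  | j :: rest =>
      if PySem.Str.strip (PySem.List.pyGetD lines j "") ≠ "" then
        some (PySem.Str.strip (PySem.List.pyGetD lines j ""), j)
      else pvInnerA lines rest

-- outer loop: 'for idx, line in enumerate(lines): if line.lower() == target: …'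
def pvOuterA (lines : List String) (target : String) : List (Int × String) → Option String × Option Int
  | [] => (none, none)
  | (idx, line) :: rest =>
      if PySem.Str.lower line = target then
        match pvInnerA lines (PySem.List.pyRange (idx + 1) (lines.length : Int) 1) with
        | some (v, j) => (some v, some j)
        | none => pvOuterA lines target rest
      else pvOuterA lines target rest

def find_labeled_value_py (lines : List String) (label : String) : Option String × Option Int :=
  pvOuterA lines (PySem.Str.lower label) (PySem.List.enumerate lines 0)

-- ===== PORT B =====
-- single pass with a boolean 'found' flag
def pvLoopB (target : String) : List (Int × String) → Bool → Option String × Option Int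
  | [], _ => (none, none)
  | (idx, line) :: rest, found =>
      if found then
        if PySem.Str.strip line ≠ "" then (some (PySem.Str.strip line), some idx)
        else pvLoopB target rest found
      else if PySem.Str.lower line = target then pvLoopB target rest true
      else pvLoopB target rest false

def find_labeled_value_py_alt (lines : List String) (label : String) : Option String × Option Int :=
  pvLoopB (PySem.Str.lower label) (PySem.List.enumerate lines 0) false

-- ===== PRECONDITION & SPEC =====
def Spec_find_labeled_value_py (lines : List String) (label : String) (out : Option String × Option Int) : Prop := out = find_labeled_value_py_alt lines label
instance (lines : List String) (label : String) (out : Option String × Option Int) : Decidable (Spec_find_labeled_value_py lines label out) := by unfold Spec_find_labeled_value_py; infer_instance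

-- ===== CLAIM (what is proved, stated in full; the proofs are below) =====
def Claim_equal_find_labeled_value_py : Prop := ∀ (lines : List String) (label : String), Dom_find_labeled_value_py lines label → Spec_find_labeled_value_py lines label (find_labeled_value_py lines label)

-- ===== LEMMAS AND PROOFS =====

-- facts from 'lines.drop k = s :: rest'
lemma drop_cons_lt {α : Type} {lines : List α} {k : Nat} {s : α} {rest : List α}
    (h : lines.drop k = s :: rest) : k < lines.length := by
  by_contra hk
  rw [List.drop_eq_nil_of_le (by omega)] at h
  simp at h

lemma drop_cons_get {α : Type} {lines : List α} {k : Nat} {s : α} {rest : List α}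
    (h : lines.drop k = s :: rest) (hk : k < lines.length) : lines[k] = s := by
  have h9 : lines[k]? = some s := by
    have := congrArg (fun l => l[0]?) h
    simpa using this
  exact Option.some_injective _ (by rw [← List.getElem?_eq_getElem hk, h9])

lemma drop_cons_tail {α : Type} {lines : List α} {k : Nat} {s : α} {rest : List α}
    (h : lines.drop k = s :: rest) : lines.drop (k + 1) = rest := by
  have : (lines.drop k).drop 1 = rest := by rw [h]; rfl
  simpa [List.drop_drop] using this

-- the matched state: A's inner index scan from k agrees with B's found-flag pass over the suffix
lemma inner_eq_loop (target : String) :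
    ∀ (suf : List String) (lines : List String) (k : Nat), lines.drop k = suf →
    (match pvInnerA lines (PySem.List.pyRange (k : Int) (lines.length : Int) 1) with
      | some (v, j) => ((some v, some j) : Option String × Option Int)
      | none => (none, none))
    = pvLoopB target (PySem.List.enumerate suf (k : Int)) true := by
  intro suf
  induction suf with
  | nil =>
      intro lines k h
      have hk : lines.length ≤ k := by
        by_contra hk
        have := List.drop_eq_nil_iff.mp h
        omega
      rw [PySem.List.pyRange_one_eq_nil (by exact_mod_cast hk)]
      simp [pvInnerA, pvLoopB, PySem.List.enumerate]
  | cons s rest ih =>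
      intro lines k h
      have hk : k < lines.length := drop_cons_lt h
      have hget : lines[k] = s := drop_cons_get h hk
      have htail : lines.drop (k + 1) = rest := drop_cons_tail h
      rw [PySem.List.pyRange_one_cons (by exact_mod_cast hk)]
      have hgd : PySem.List.pyGetD lines (k : Int) "" = s := by
        rw [PySem.List.pyGetD_natCast, List.getD_eq_getElem?_getD,
          List.getElem?_eq_getElem hk, hget]; rfl
      rw [PySem.List.enumerate_cons]
      by_cases hs : PySem.Str.strip s = ""
      · have hk1 : ((k : Int) + 1) = ((k + 1 : Nat) : Int) := by push_cast; ring
        have e1 : pvInnerA lines ((k : Int) :: PySem.List.pyRange ((k : Int) + 1) (lines.length : Int) 1)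
            = pvInnerA lines (PySem.List.pyRange ((k : Int) + 1) (lines.length : Int) 1) := by
          simp [pvInnerA, hgd, hs]
        have e2 : pvLoopB target (((k : Int), s) :: PySem.List.enumerate rest ((k : Int) + 1)) true
            = pvLoopB target (PySem.List.enumerate rest ((k : Int) + 1)) true := by
          simp [pvLoopB, hs]
        rw [e1, e2, hk1]
        exact ih lines (k + 1) htail
      · have e1 : pvInnerA lines ((k : Int) :: PySem.List.pyRange ((k : Int) + 1) (lines.length : Int) 1)
            = some (PySem.Str.strip s, (k : Int)) := by
          simp [pvInnerA, hgd, hs]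
        have e2 : pvLoopB target (((k : Int), s) :: PySem.List.enumerate rest ((k : Int) + 1)) true
            = (some (PySem.Str.strip s), some (k : Int)) := by
          simp [pvLoopB, hs]
        rw [e1, e2]

-- if A's inner scan from k finds nothing, the outer loop over the suffix returns (none, none)
lemma outer_none (target : String) :
    ∀ (suf : List String) (lines : List String) (k : Nat), lines.drop k = suf →
    pvInnerA lines (PySem.List.pyRange (k : Int) (lines.length : Int) 1) = none →
    pvOuterA lines target (PySem.List.enumerate suf (k : Int)) = (none, none) := by
  intro suf
  induction suf with
  | nil => intro lines k _ _; simp [PySem.List.enumerate, pvOuterA]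
  | cons s rest ih =>
      intro lines k h hnone
      have hk : k < lines.length := drop_cons_lt h
      have hget : lines[k] = s := drop_cons_get h hk
      have htail : lines.drop (k + 1) = rest := drop_cons_tail h
      have hgd : PySem.List.pyGetD lines (k : Int) "" = s := by
        rw [PySem.List.pyGetD_natCast, List.getD_eq_getElem?_getD,
          List.getElem?_eq_getElem hk, hget]; rfl
      rw [PySem.List.pyRange_one_cons (by exact_mod_cast hk)] at hnone
      have hk1 : ((k : Int) + 1) = ((k + 1 : Nat) : Int) := by push_cast; ring
      by_cases hs : PySem.Str.strip s = ""
      · have e1 : pvInnerA lines ((k : Int) :: PySem.List.pyRange ((k : Int) + 1) (lines.length : Int) 1)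
            = pvInnerA lines (PySem.List.pyRange ((k : Int) + 1) (lines.length : Int) 1) := by
          simp [pvInnerA, hgd, hs]
        rw [e1] at hnone
        have hnone' := hnone
        rw [hk1] at hnone'
        have hrest := ih lines (k + 1) htail hnone'
        rw [← hk1] at hrest
        rw [PySem.List.enumerate_cons]
        simp only [pvOuterA]
        by_cases hm : PySem.Str.lower s = target
        · rw [if_pos hm, hnone]
          exact hrest
        · rw [if_neg hm]
          exact hrest
      · have e1 : pvInnerA lines ((k : Int) :: PySem.List.pyRange ((k : Int) + 1) (lines.length : Int) 1)
            = some (PySem.Str.strip s, (k : Int)) := by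
          simp [pvInnerA, hgd, hs]
        rw [e1] at hnone
        exact absurd hnone (by simp)

-- the not-yet-found state: A's outer loop agrees with B's pass with found = false
lemma outer_eq_loop (target : String) :
    ∀ (suf : List String) (lines : List String) (k : Nat), lines.drop k = suf →
    pvOuterA lines target (PySem.List.enumerate suf (k : Int))
      = pvLoopB target (PySem.List.enumerate suf (k : Int)) false := by
  intro suf
  induction suf with
  | nil => intro lines k _; simp [PySem.List.enumerate, pvOuterA, pvLoopB]
  | cons s rest ih =>
      intro lines k h
      have htail : lines.drop (k + 1) = rest := drop_cons_tail h
      have hk1 : ((k : Int) + 1) = ((k + 1 : Nat) : Int) := by push_cast; ring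
      rw [PySem.List.enumerate_cons]
      simp only [pvOuterA, pvLoopB, Bool.false_eq_true, if_neg (by simp : ¬False)]
      by_cases hm : PySem.Str.lower s = target
      · rw [if_pos hm, if_pos hm]
        have hinner := inner_eq_loop target rest lines (k + 1) htail
        rw [← hk1] at hinner
        cases hcase : pvInnerA lines (PySem.List.pyRange ((k : Int) + 1) (lines.length : Int) 1) with
        | some p =>
            rw [hcase] at hinner
            exact hinner
        | none =>
            rw [hcase] at hinner
            have hnone' : pvInnerA lines (PySem.List.pyRange (((k + 1 : Nat) : Int)) (lines.length : Int) 1) = none := by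
              rw [← hk1]; exact hcase
            have := outer_none target rest lines (k + 1) htail hnone'
            rw [← hk1] at this
            rw [this, ← hinner]
      · rw [if_neg hm, if_neg hm]
        have := ih lines (k + 1) htail
        rw [← hk1] at this
        exact this

-- ===== VERDICT (by name: the statement is the Claim_ definition above) =====
theorem find_labeled_value_py_spec : Claim_equal_find_labeled_value_py := by
  intro lines label _
  unfold Spec_find_labeled_value_py find_labeled_value_py find_labeled_value_py_alt
  have := outer_eq_loop (PySem.Str.lower label) lines lines 0 (by simp)
  simpa using this
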